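-- pv_equiv track=rewrite | github.com/yeele/aoj | problems/prp_deletion_distance_v4_peer.py | deletion_distance_LESS_Dynamic_Memory
-- ===== SOURCE A (Python) =====
-- def deletion_distance_LESS_Dynamic_Memory(str1, str2):
--     l1 = len(str1)
--     l2 = len(str2)
--     ans = [0]*(l2+1)
--     for i1, ch1 in enumerate(str1):
--         next_ans = [0]*(l2+1)
--         for i2, ch2 in enumerate(str2):
--             if ch1 == ch2:
--                 next_ans[i2+1] = 1 + ans[i2]
--             else:
--                 next_ans[i2+1] = max(ans[i2+1], next_ans[i2])
--         ans = next_ans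
--     match_len = ans[-1]
--     return l1 + l2 - 2 * match_len
-- ===== SOURCE B (Python) =====
-- def deletion_distance_LESS_Dynamic_Memory(str1, str2):
--     # Edit-distance-style DP: dp[j] = deletion distance between str1[:i] and str2[:j].
--     dp = list(range(len(str2) + 1))
--     for i1, ch1 in enumerate(str1):
--         new = [i1 + 1]
--         for i2, ch2 in enumerate(str2):
--             new.append(dp[i2] if ch1 == ch2 else 1 + min(dp[i2 + 1], new[-1]))
--         dp = new
--     return dp[-1]
-- ===== Notes on version B (the rewrite author's own statement) =====
-- stated objective: alternative
-- what changed: B computes the deletion distance directly with an edit-distance DP whose rows hold deletion counts (min/+1 recurrence, rows built by append onto an initialized 0..l2 row), instead of A's LCS-length DP (max recurrence over zero-initialized rows) followed by the l1+l2-2*LCS conversion.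
import Mathlib
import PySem

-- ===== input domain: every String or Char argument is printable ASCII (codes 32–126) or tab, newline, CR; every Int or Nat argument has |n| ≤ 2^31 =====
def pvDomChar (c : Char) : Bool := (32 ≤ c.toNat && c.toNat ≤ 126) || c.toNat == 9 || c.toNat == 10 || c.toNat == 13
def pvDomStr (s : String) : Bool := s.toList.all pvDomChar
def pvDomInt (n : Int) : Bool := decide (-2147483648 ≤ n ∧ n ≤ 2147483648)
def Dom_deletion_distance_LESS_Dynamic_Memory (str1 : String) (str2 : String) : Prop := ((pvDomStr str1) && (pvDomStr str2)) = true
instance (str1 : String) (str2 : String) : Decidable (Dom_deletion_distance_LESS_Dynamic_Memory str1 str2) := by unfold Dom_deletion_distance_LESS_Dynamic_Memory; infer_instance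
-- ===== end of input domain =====

-- B replaces A's LCS-length DP (max recurrence + l1+l2-2*LCS conversion) by a direct
-- edit-distance DP over deletion counts (min/+1 recurrence, rows appended onto 0..l2);
-- objective: alternative algorithm of the same cost.

-- ===== PORT A =====
-- inner loop 'for i2, ch2 in enumerate(str2)' with explicit index i2 and list state next
def pvInnerA (ch1 : Char) (ans : List Int) : Nat → List Int → List Char → List Int
  | _, next, [] => next
  | i2, next, c :: cs =>
      pvInnerA ch1 ans (i2+1)
        (if ch1 == c then next.set (i2+1) (1 + ans.getD i2 0)
         else next.set (i2+1) (max (ans.getD (i2+1) 0) (next.getD i2 0))) cs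

-- outer loop 'for i1, ch1 in enumerate(str1)' (i1 is unused in A's body)
def pvOuterA (s2 : List Char) : List Int → List Char → List Int
  | ans, [] => ans
  | ans, c :: cs => pvOuterA s2 (pvInnerA c ans 0 (List.replicate (s2.length+1) 0) s2) cs

def deletion_distance_LESS_Dynamic_Memory (str1 : String) (str2 : String) : Int :=
  let l1 : Int := str1.toList.length
  let l2 : Int := str2.toList.length
  let ans := pvOuterA str2.toList (List.replicate (str2.toList.length+1) 0) str1.toList
  let match_len := (PySem.List.pyGet? ans (-1)).getD 0   -- ans[-1]; always in range (row length l2+1 ≥ 1)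
  l1 + l2 - 2 * match_len

-- ===== PORT B =====
-- inner loop: append 'dp[i2] if ch1==ch2 else 1+min(dp[i2+1], new[-1])'
def pvInnerB (ch1 : Char) (dp : List Int) : Nat → List Int → List Char → List Int
  | _, new, [] => new
  | i2, new, c :: cs =>
      pvInnerB ch1 dp (i2+1)
        (new ++ [if ch1 == c then dp.getD i2 0
                 else 1 + min (dp.getD (i2+1) 0) ((PySem.List.pyGet? new (-1)).getD 0)]) cs

def pvOuterB (s2 : List Char) : Nat → List Int → List Char → List Int
  | _, dp, [] => dp
  | i1, dp, c :: cs => pvOuterB s2 (i1+1) (pvInnerB c dp 0 [(i1 : Int) + 1] s2) cs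

def deletion_distance_LESS_Dynamic_Memory_alt (str1 : String) (str2 : String) : Int :=
  let dp0 := (List.range (str2.toList.length+1)).map (fun n : Nat => (n : Int))  -- list(range(len(str2)+1))
  let dp := pvOuterB str2.toList 0 dp0 str1.toList
  (PySem.List.pyGet? dp (-1)).getD 0   -- dp[-1]; always in range

-- ===== PRECONDITION & SPEC =====
def Spec_deletion_distance_LESS_Dynamic_Memory (str1 : String) (str2 : String) (out : Int) : Prop := out = deletion_distance_LESS_Dynamic_Memory_alt str1 str2
instance (str1 : String) (str2 : String) (out : Int) : Decidable (Spec_deletion_distance_LESS_Dynamic_Memory str1 str2 out) := by unfold Spec_deletion_distance_LESS_Dynamic_Memory; infer_instance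

-- ===== CLAIM (what is proved, stated in full; the proofs are below) =====
def Claim_equal_deletion_distance_LESS_Dynamic_Memory : Prop := ∀ (str1 : String) (str2 : String), Dom_deletion_distance_LESS_Dynamic_Memory str1 str2 → Spec_deletion_distance_LESS_Dynamic_Memory str1 str2 (deletion_distance_LESS_Dynamic_Memory str1 str2)

-- ===== LEMMAS AND PROOFS =====

-- clean recursive forms of the two inner loops (proof devices)
def goA (ch1 : Char) : Int → List Int → List Char → List Int
  | _, _, [] => []
  | cur, ansR, c :: cs =>
      let v := if ch1 == c then 1 + ansR.getD 0 0 else max (ansR.getD 1 0) cur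
      v :: goA ch1 v ansR.tail cs

def goB (ch1 : Char) : Int → List Int → List Char → List Int
  | _, _, [] => []
  | cur, dpR, c :: cs =>
      let v := if ch1 == c then dpR.getD 0 0 else 1 + min (dpR.getD 1 0) cur
      v :: goB ch1 v dpR.tail cs

lemma goA_length (ch1 : Char) : ∀ (cs : List Char) (cur : Int) (ansR : List Int),
    (goA ch1 cur ansR cs).length = cs.length := by
  intro cs; induction cs with
  | nil => intro cur ansR; rfl
  | cons c cs ih => intro cur ansR; simp [goA, ih]

lemma goB_length (ch1 : Char) : ∀ (cs : List Char) (cur : Int) (dpR : List Int),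
    (goB ch1 cur dpR cs).length = cs.length := by
  intro cs; induction cs with
  | nil => intro cur dpR; rfl
  | cons c cs ih => intro cur dpR; simp [goB, ih]

lemma getD_tail (l : List Int) (j : Nat) (d : Int) : l.tail.getD j d = l.getD (j+1) d := by
  cases l <;> simp [List.getD]

lemma set_append_len (p l : List Int) (v : Int) :
    (p ++ l).set p.length v = p ++ l.set 0 v := by
  induction p with
  | nil => simp
  | cons x p ih => simp [ih]

lemma getD_append_left (p l : List Int) (i : Nat) (d : Int) (h : i < p.length) :
    (p ++ l).getD i d = p.getD i d := by
  simp [List.getD, List.getElem?_append_left h]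

lemma getD_append_self (p : List Int) (v : Int) (d : Int) :
    (p ++ [v]).getD p.length d = v := by
  simp [List.getD]

lemma innerA_eq (ch1 : Char) (ans : List Int) :
    ∀ (cs : List Char) (i2 : Nat) (p : List Int), p.length = i2 + 1 →
      pvInnerA ch1 ans i2 (p ++ List.replicate cs.length 0) cs
        = p ++ goA ch1 (p.getD i2 0) (ans.drop i2) cs := by
  intro cs
  induction cs with
  | nil => intro i2 p hp; simp [pvInnerA, goA]
  | cons c cs ih =>
    intro i2 p hp
    have hrep : List.replicate (c :: cs).length (0 : Int) = (0 : Int) :: List.replicate cs.length 0 := by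
      simp [List.replicate_succ]
    have hget : (p ++ (0 : Int) :: List.replicate cs.length 0).getD i2 0 = p.getD i2 0 :=
      getD_append_left _ _ _ _ (by omega)
    have hset : ∀ v : Int,
        (p ++ (0 : Int) :: List.replicate cs.length 0).set (i2+1) v
          = (p ++ [v]) ++ List.replicate cs.length 0 := by
      intro v
      have := set_append_len p ((0 : Int) :: List.replicate cs.length 0) v
      rw [hp] at this
      simpa [List.append_assoc] using this
    rw [hrep]
    simp only [pvInnerA, hget]
    rw [show (if (ch1 == c) = true then
          (p ++ (0:Int) :: List.replicate cs.length 0).set (i2+1) (1 + ans.getD i2 0)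
        else
          (p ++ (0:Int) :: List.replicate cs.length 0).set (i2+1)
            (max (ans.getD (i2+1) 0) (p.getD i2 0)))
        = (p ++ [if (ch1 == c) = true then 1 + ans.getD i2 0
            else max (ans.getD (i2+1) 0) (p.getD i2 0)]) ++ List.replicate cs.length 0 from by
      split <;> rw [hset]]
    rw [ih (i2+1) (p ++ [if (ch1 == c) = true then 1 + ans.getD i2 0
        else max (ans.getD (i2+1) 0) (p.getD i2 0)]) (by simp [hp])]
    have hlast : (p ++ [if (ch1 == c) = true then 1 + ans.getD i2 0
        else max (ans.getD (i2+1) 0) (p.getD i2 0)]).getD (i2+1) 0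
        = (if (ch1 == c) = true then 1 + ans.getD i2 0 else max (ans.getD (i2+1) 0) (p.getD i2 0)) := by
      rw [← hp]; exact getD_append_self _ _ _
    rw [hlast]
    simp [goA, List.tail_drop, List.append_assoc]

lemma innerB_eq (ch1 : Char) (dp : List Int) :
    ∀ (cs : List Char) (i2 : Nat) (new : List Int),
      pvInnerB ch1 dp i2 new cs
        = new ++ goB ch1 ((PySem.List.pyGet? new (-1)).getD 0) (dp.drop i2) cs := by
  intro cs
  induction cs with
  | nil => intro i2 new; simp [pvInnerB, goB]
  | cons c cs ih =>
    intro i2 new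
    simp only [pvInnerB]
    rw [ih (i2+1)]
    rw [List.append_assoc]
    congr 1
    simp [goB, List.tail_drop, PySem.List.pyGet?_neg_one_append_singleton]

-- core pointwise relation: B's deletion-count row = i + j - 2 * (A's LCS row)
lemma go_rel (ch1 : Char) :
    ∀ (cs : List Char) (ansR dpR : List Int) (curA curB m : Int),
      (∀ j : Nat, j ≤ cs.length → dpR.getD j 0 = m + j - 2 * ansR.getD j 0) →
      curB = m + 1 - 2 * curA →
      ∀ t : Nat, t < cs.length →
        (goB ch1 curB dpR cs).getD t 0 = m + 2 + t - 2 * (goA ch1 curA ansR cs).getD t 0 := by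
  intro cs
  induction cs with
  | nil => intro _ _ _ _ _ _ _ t ht; simp at ht
  | cons c cs ih =>
    intro ansR dpR curA curB m hrel hcur t ht
    have h0 := hrel 0 (by simp)
    have h1 := hrel 1 (by simp)
    set vA := if ch1 == c then 1 + ansR.getD 0 0 else max (ansR.getD 1 0) curA with hvA
    set vB := if ch1 == c then dpR.getD 0 0 else 1 + min (dpR.getD 1 0) curB with hvB
    have hv : vB = m + 2 - 2 * vA := by
      rw [hvA, hvB]
      split
      · push_cast at h0; omega
      · rw [min_def, max_def]
        push_cast at h1
        split_ifs <;> omega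
    have hrelt : ∀ j : Nat, j ≤ cs.length →
        dpR.tail.getD j 0 = (m + 1) + j - 2 * ansR.tail.getD j 0 := by
      intro j hj
      rw [getD_tail, getD_tail]
      have := hrel (j+1) (by simpa using Nat.succ_le_succ hj)
      push_cast at this ⊢; omega
    have hgo : goA ch1 curA ansR (c :: cs) = vA :: goA ch1 vA ansR.tail cs := by
      simp [goA, hvA]
    have hgo' : goB ch1 curB dpR (c :: cs) = vB :: goB ch1 vB dpR.tail cs := by
      simp [goB, hvB]
    rw [hgo, hgo']
    cases t with
    | zero => simpa using hv
    | succ t =>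
      simp only [List.getD_cons_succ]
      have := ih ansR.tail dpR.tail vA vB (m+1) hrelt (by omega) t (by simpa using ht)
      push_cast at this ⊢; omega

-- row iteration: lengths stay l2+1 and the pointwise relation is preserved
lemma rows_rel (s2 : List Char) :
    ∀ (cs1 : List Char) (i : Nat) (ans dp : List Int),
      ans.length = s2.length + 1 → dp.length = s2.length + 1 →
      (∀ j : Nat, j ≤ s2.length → dp.getD j 0 = (i : Int) + j - 2 * ans.getD j 0) →
      (pvOuterA s2 ans cs1).length = s2.length + 1 ∧
      (pvOuterB s2 i dp cs1).length = s2.length + 1 ∧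
      (∀ j : Nat, j ≤ s2.length →
        (pvOuterB s2 i dp cs1).getD j 0
          = ((i + cs1.length : Nat) : Int) + j - 2 * (pvOuterA s2 ans cs1).getD j 0) := by
  intro cs1
  induction cs1 with
  | nil =>
    intro i ans dp ha hd hrel
    refine ⟨ha, hd, ?_⟩
    intro j hj
    simpa using hrel j hj
  | cons c cs1 ih =>
    intro i ans dp ha hd hrel
    have hAnsN : pvInnerA c ans 0 (List.replicate (s2.length+1) 0) s2
        = (0 : Int) :: goA c 0 ans s2 := by
      have := innerA_eq c ans s2 0 [0] (by simp)
      simpa [List.replicate_succ] using this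
    have hDpN : pvInnerB c dp 0 [(i : Int) + 1] s2
        = ((i : Int) + 1) :: goB c ((i : Int) + 1) dp s2 := by
      have := innerB_eq c dp s2 0 [(i : Int) + 1]
      simpa [PySem.List.pyGet?] using this
    have hlenA : ((0 : Int) :: goA c 0 ans s2).length = s2.length + 1 := by
      simp [goA_length]
    have hlenB : (((i : Int) + 1) :: goB c ((i : Int) + 1) dp s2).length = s2.length + 1 := by
      simp [goB_length]
    have hrelN : ∀ j : Nat, j ≤ s2.length →
        (((i : Int) + 1) :: goB c ((i : Int) + 1) dp s2).getD j 0
          = ((i+1 : Nat) : Int) + j - 2 * ((0 : Int) :: goA c 0 ans s2).getD j 0 := by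
      intro j hj
      cases j with
      | zero => simp
      | succ t =>
        simp only [List.getD_cons_succ]
        have := go_rel c s2 ans dp 0 ((i : Int) + 1) (i : Int)
          (by intro j hj'; simpa using hrel j hj') (by ring) t (by omega)
        push_cast at this ⊢; omega
    have := ih (i+1) ((0 : Int) :: goA c 0 ans s2) (((i : Int) + 1) :: goB c ((i : Int) + 1) dp s2)
      hlenA hlenB hrelN
    simp only [pvOuterA, pvOuterB, hAnsN, hDpN]
    refine ⟨this.1, this.2.1, ?_⟩
    intro j hj
    have h := this.2.2 j hj
    rw [h]
    simp only [List.length_cons]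
    push_cast
    ring

lemma getD_range_map (n j : Nat) (hj : j < n) :
    (((List.range n).map (fun k : Nat => (k : Int))).getD j 0) = (j : Int) := by
  simp only [List.getD, List.getElem?_map, List.getElem?_range hj, Option.map_some, Option.getD_some]

lemma pyGet_neg_one_getD (l : List Int) (n : Nat) (h : l.length = n + 1) :
    (PySem.List.pyGet? l (-1)).getD 0 = l.getD n 0 := by
  rw [PySem.List.pyGet?_neg_one]
  rw [List.getLast?_eq_getElem?]
  simp [List.getD, h]

-- ===== VERDICT (by name: the statement is the Claim_ definition above) =====
theorem deletion_distance_LESS_Dynamic_Memory_spec : Claim_equal_deletion_distance_LESS_Dynamic_Memory := by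
  intro str1 str2 _
  unfold Spec_deletion_distance_LESS_Dynamic_Memory
  unfold deletion_distance_LESS_Dynamic_Memory deletion_distance_LESS_Dynamic_Memory_alt
  dsimp only
  set s1 := str1.toList
  set s2 := str2.toList
  have hbase : ∀ j : Nat, j ≤ s2.length →
      (((List.range (s2.length+1)).map (fun k : Nat => (k : Int))).getD j 0)
        = ((0 : Nat) : Int) + j - 2 * ((List.replicate (s2.length+1) (0 : Int)).getD j 0) := by
    intro j hj
    rw [getD_range_map _ _ (by omega)]
    simp [List.getD, Nat.lt_succ_of_le hj]
  have h := rows_rel s2 s1 0 (List.replicate (s2.length+1) 0)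
    ((List.range (s2.length+1)).map (fun k : Nat => (k : Int)))
    (by simp) (by simp) hbase
  obtain ⟨hla, hlb, hrel⟩ := h
  rw [pyGet_neg_one_getD _ _ hla, pyGet_neg_one_getD _ _ hlb]
  have := hrel s2.length (le_refl _)
  rw [this]
  push_cast
  ring
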